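-- pv_equiv track=rewrite | github.com/kabads/advent-of-code-2024 | day01.py | count_list_frequency
-- ===== SOURCE A (Python) =====
-- def count_list_frequency(left_list, right_list):
--     frequency_dict = {}
--     for num in right_list:
--         if num in frequency_dict:
--             frequency_dict[num] += 1
--         else:
--             frequency_dict[num] = 1
--
--     result = []
--     for num in left_list:
--         if num in frequency_dict:
--             result.append(num * frequency_dict[num])
--         else:
--             result.append(0)
--
--     return result
-- ===== SOURCE B (Python) =====
-- def count_list_frequency(left_list, right_list):
--     result = [0] * len(left_list)
--     for num in right_list:
--         result = [r + num if x == num else r for r, x in zip(result, left_list)]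
--     return result
-- ===== Notes on version B (the rewrite author's own statement) =====
-- stated objective: alternative
-- what changed: Inverts the traversal: no frequency index is ever built or looked up; B starts from a zero vector of len(left_list) and, for each element of right_list, scatter-adds that value into every output slot whose left element matches, so counts are never computed at all.
import Mathlib
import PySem

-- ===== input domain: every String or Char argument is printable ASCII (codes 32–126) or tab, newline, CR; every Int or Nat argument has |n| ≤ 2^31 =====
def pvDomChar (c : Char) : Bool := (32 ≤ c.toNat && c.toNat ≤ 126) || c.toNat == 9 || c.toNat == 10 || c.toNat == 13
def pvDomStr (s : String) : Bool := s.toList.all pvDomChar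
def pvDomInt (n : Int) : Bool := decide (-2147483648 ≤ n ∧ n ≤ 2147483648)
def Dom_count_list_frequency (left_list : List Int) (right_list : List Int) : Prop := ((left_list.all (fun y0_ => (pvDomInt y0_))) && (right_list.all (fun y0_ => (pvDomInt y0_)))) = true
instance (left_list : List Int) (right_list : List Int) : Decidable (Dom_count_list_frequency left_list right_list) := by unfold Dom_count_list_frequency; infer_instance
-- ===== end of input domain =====

-- B inverts the traversal: no frequency index at all — a zero vector is scatter-updated once per right element (alternative decomposition, same exact values).

-- ===== PORT A =====
def count_list_frequency (left_list : List Int) (right_list : List Int) : List Int :=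
  let frequency_dict : PySem.Dict Int Int :=
    right_list.foldl (fun d num =>
      if d.contains num then d.modify num 0 (· + 1) else d.insert num 1) PySem.Dict.empty
  left_list.foldl (fun result num =>
    if frequency_dict.contains num then result ++ [num * frequency_dict.getD num 0]
    else result ++ [0]) []

-- ===== PORT B =====
def count_list_frequency_alt (left_list : List Int) (right_list : List Int) : List Int :=
  right_list.foldl (fun result num =>
    (result.zip left_list).map (fun rx => if rx.2 = num then rx.1 + num else rx.1))
    (List.replicate left_list.length 0)

-- ===== PRECONDITION & SPEC =====
def Spec_count_list_frequency (left_list : List Int) (right_list : List Int) (out : List Int) : Prop := out = count_list_frequency_alt left_list right_list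
instance (left_list : List Int) (right_list : List Int) (out : List Int) : Decidable (Spec_count_list_frequency left_list right_list out) := by unfold Spec_count_list_frequency; infer_instance

-- ===== CLAIM (what is proved, stated in full; the proofs are below) =====
def Claim_equal_count_list_frequency : Prop := ∀ (left_list : List Int) (right_list : List Int), Dom_count_list_frequency left_list right_list → Spec_count_list_frequency left_list right_list (count_list_frequency left_list right_list)

-- ===== LEMMAS AND PROOFS =====

-- A's frequency loop, abstracted.
def pvFreqStep (d : PySem.Dict Int Int) (num : Int) : PySem.Dict Int Int :=
  if d.contains num then d.modify num 0 (· + 1) else d.insert num 1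

theorem pvFreq_contains (l : List Int) (d : PySem.Dict Int Int) (v : Int) :
    (l.foldl pvFreqStep d).contains v = (d.contains v || l.contains v) := by
  induction l generalizing d with
  | nil => simp
  | cons x xs ih =>
    simp only [List.foldl_cons, ih, pvFreqStep]
    by_cases h : d.contains x
    · simp only [h, if_true, PySem.Dict.contains_modify]
      by_cases hv : v = x
      · simp [hv, h]
      · rw [beq_eq_false_iff_ne.mpr hv]; simp [hv]
    · simp only [h, if_false, Bool.false_eq_true, PySem.Dict.contains_insert]
      by_cases hv : v = x
      · simp [hv, h]
      · rw [beq_eq_false_iff_ne.mpr hv]; simp [hv]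

theorem pvFreq_getD (l : List Int) (d : PySem.Dict Int Int) (v : Int) :
    (l.foldl pvFreqStep d).getD v 0 = d.getD v 0 + l.count v := by
  induction l generalizing d with
  | nil => simp
  | cons x xs ih =>
    simp only [List.foldl_cons, ih, pvFreqStep]
    by_cases hv : v = x
    · subst hv
      by_cases h : d.contains v
      · rw [if_pos h, PySem.Dict.getD_modify_self]
        simp; ring
      · rw [if_neg h, PySem.Dict.getD_insert_self,
            PySem.Dict.getD_of_not_contains (h := by simpa using h)]
        simp; ring
    · by_cases h : d.contains x
      · rw [if_pos h, PySem.Dict.getD_modify]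
        simp [hv, Ne.symm hv]
      · rw [if_neg h, PySem.Dict.getD_insert]
        simp [hv, Ne.symm hv]

-- A's result loop builds left.map (x ↦ x * right.count x).
theorem pvResult_loop (freq : PySem.Dict Int Int) (right : List Int)
    (hc : ∀ v, freq.contains v = right.contains v)
    (hg : ∀ v, freq.getD v 0 = right.count v)
    (l : List Int) (acc : List Int) :
    l.foldl (fun result num =>
      if freq.contains num then result ++ [num * freq.getD num 0]
      else result ++ [0]) acc
    = acc ++ l.map (fun num => num * right.count num) := by
  induction l generalizing acc with
  | nil => simp
  | cons x xs ih =>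
    simp only [List.foldl_cons, List.map_cons]
    rw [ih]
    by_cases h : freq.contains x = true
    · simp [h, hg x]
    · have h0 : right.count x = 0 := by
        rw [hc] at h
        simpa [List.contains_iff_mem, List.count_eq_zero] using h
      simp [h, h0]

-- one scatter step on a state of the form left.map f
theorem pvScatter_step (left : List Int) (f : Int → Int) (num : Int) :
    ((left.map f).zip left).map (fun rx => if rx.2 = num then rx.1 + num else rx.1)
    = left.map (fun x => if x = num then f x + num else f x) := by
  have hz : (left.map f).zip left = left.map (fun x => (f x, x)) := by
    induction left with
    | nil => rfl
    | cons a l ih => simp [ih]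
  rw [hz, List.map_map]
  rfl

-- B's loop: starting from left.map f, it ends at left.map (x ↦ f x + x * right.count x).
theorem pvScatter_loop (right left : List Int) (f : Int → Int) :
    right.foldl (fun result num =>
      (result.zip left).map (fun rx => if rx.2 = num then rx.1 + num else rx.1))
      (left.map f)
    = left.map (fun x => f x + x * right.count x) := by
  induction right generalizing f with
  | nil => simp
  | cons num xs ih =>
    simp only [List.foldl_cons]
    rw [pvScatter_step, ih]
    apply List.map_congr_left
    intro x _
    by_cases hx : x = num
    · subst hx
      simp; ring
    · simp [hx, Ne.symm hx]

-- ===== VERDICT (by name: the statement is the Claim_ definition above) =====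
theorem count_list_frequency_spec : Claim_equal_count_list_frequency := by
  intro left right _
  show _ = _
  unfold count_list_frequency count_list_frequency_alt
  rw [show (fun (d : PySem.Dict Int Int) (num : Int) =>
        if d.contains num then d.modify num 0 (· + 1) else d.insert num 1) = pvFreqStep from rfl]
  rw [pvResult_loop _ right
      (fun v => by rw [pvFreq_contains]; simp)
      (fun v => by rw [pvFreq_getD]; simp)]
  rw [show List.replicate left.length (0 : Int) = left.map (fun _ => 0) from by simp]
  rw [pvScatter_loop]
  simp
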